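-- pv_equiv track=rewrite | github.com/Sandipan99/amazonReview | models/HAN/inference.py | mergeSentences
-- ===== SOURCE A (Python) =====
-- def mergeSentences(batch):
--     sent = []
--     label = []
--     rev_id = []
--     for review, l, id_ in batch:
--         sent += review
--         label.append(l)
--         rev_id.append(id_)
--     return sent, label, rev_id
-- ===== SOURCE B (Python) =====
-- def mergeSentences(batch):
--     if not batch:
--         return [], [], []
--     reviews, labels, ids = zip(*batch)
--     sent = [x for r in reviews for x in r]
--     return sent, list(labels), list(ids)
-- ===== Notes on version B (the rewrite author's own statement) =====
-- stated objective: idiomatic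
-- what changed: Replaced the row-wise accumulating loop over triples with an empty-batch guard plus zip(*batch) transpose and per-column construction (nested comprehension for the flattened reviews, list() for labels and ids).
import Mathlib
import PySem

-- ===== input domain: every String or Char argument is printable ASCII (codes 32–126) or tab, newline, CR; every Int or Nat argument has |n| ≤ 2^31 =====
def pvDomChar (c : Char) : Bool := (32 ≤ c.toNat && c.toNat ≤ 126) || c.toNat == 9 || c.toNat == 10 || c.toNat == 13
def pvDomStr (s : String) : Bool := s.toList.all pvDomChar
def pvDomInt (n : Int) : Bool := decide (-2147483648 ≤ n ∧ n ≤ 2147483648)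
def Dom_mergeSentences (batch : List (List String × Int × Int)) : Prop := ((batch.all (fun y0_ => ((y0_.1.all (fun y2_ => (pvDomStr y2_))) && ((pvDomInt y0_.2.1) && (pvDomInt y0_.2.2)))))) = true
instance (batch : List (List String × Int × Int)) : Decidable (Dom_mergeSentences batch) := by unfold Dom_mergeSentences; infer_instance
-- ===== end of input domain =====

-- B replaces A's row-wise accumulating loop with an empty-batch guard plus a
-- transpose-then-per-column construction (flatten the review column, copy the
-- label and id columns); objective: idiomatic.

-- ===== PORT A =====
-- A's single loop, appending each row's pieces to the three accumulators.
def mergeSentences (batch : List (List String × Int × Int)) : List String × List Int × List Int :=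
  batch.foldl
    (fun acc row =>
      (acc.1 ++ row.1, acc.2.1 ++ [row.2.1], acc.2.2 ++ [row.2.2]))
    ([], [], [])

-- ===== PORT B =====
-- Source B: guard the empty batch, transpose, then build each output column-wise.
def mergeSentences_alt (batch : List (List String × Int × Int)) : List String × List Int × List Int :=
  match batch with
  | [] => ([], [], [])
  | _ :: _ =>
    -- zip(*batch): the three columns
    let reviews := batch.map (fun t => t.1)
    let labels := batch.map (fun t => t.2.1)
    let ids := batch.map (fun t => t.2.2)
    -- [x for r in reviews for x in r]
    (reviews.flatMap (fun r => r), labels, ids)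

-- ===== PRECONDITION & SPEC =====
def Spec_mergeSentences (batch : List (List String × Int × Int)) (out : List String × List Int × List Int) : Prop := out = mergeSentences_alt batch
instance (batch : List (List String × Int × Int)) (out : List String × List Int × List Int) : Decidable (Spec_mergeSentences batch out) := by unfold Spec_mergeSentences; infer_instance

-- ===== CLAIM (what is proved, stated in full; the proofs are below) =====
def Claim_equal_mergeSentences : Prop := ∀ (batch : List (List String × Int × Int)), Dom_mergeSentences batch → Spec_mergeSentences batch (mergeSentences batch)

-- ===== LEMMAS AND PROOFS =====
theorem mergeSentences_foldl_acc (batch : List (List String × Int × Int))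
    (s : List String) (l r : List Int) :
    batch.foldl
      (fun acc row =>
        (acc.1 ++ row.1, acc.2.1 ++ [row.2.1], acc.2.2 ++ [row.2.2]))
      (s, l, r)
    = (s ++ batch.flatMap (fun t => t.1),
       l ++ batch.map (fun t => t.2.1),
       r ++ batch.map (fun t => t.2.2)) := by
  induction batch generalizing s l r with
  | nil => simp
  | cons hd tl ih => simp [List.foldl, ih, List.append_assoc]

-- ===== VERDICT (by name: the statement is the Claim_ definition above) =====
theorem mergeSentences_spec : Claim_equal_mergeSentences := by
  intro batch _
  unfold Spec_mergeSentences mergeSentences mergeSentences_alt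
  cases batch with
  | nil => rfl
  | cons hd tl => simp [mergeSentences_foldl_acc, List.flatMap_def, Function.comp_def]
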